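-- pv_equiv track=rewrite | github.com/biglone/screenfish | src/stock_screener/formula_parser.py | _strip_draw_attrs
-- ===== SOURCE A (Python) =====
-- def _strip_draw_attrs(expr: str) -> str:
--     """
--     Strip TongDaXin drawing attributes from an output expression.
--
--     Examples:
--       - "EMA(C,10),COLORRED,LINETHICK2" -> "EMA(C,10)"
--       - "LOW,COLORYELLOW,LINETHICK0" -> "LOW"
--     """
--     expr = expr.strip()
--     paren_depth = 0
--     for i, char in enumerate(expr):
--         if char == '(':
--             paren_depth += 1
--         elif char == ')':
--             paren_depth -= 1
--         elif char == ',' and paren_depth == 0: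
--             return expr[:i].strip()
--     return expr
-- ===== SOURCE B (Python) =====
-- def _strip_draw_attrs(expr: str) -> str:
--     s = expr.strip()
--     parts = s.split(',')
--     consumed = []
--     for part in parts[:-1]:
--         consumed.append(part)
--         prefix = ','.join(consumed)
--         if prefix.count('(') == prefix.count(')'):
--             return prefix.strip()
--     return s
-- ===== Notes on version B (the rewrite author's own statement) =====
-- stated objective: faster
-- what changed: Replaces A's per-character indexed scan with a depth counter by splitting on commas once and, at each segment boundary, testing parenthesis balance of the rejoined growing prefix via equal open/close counts.
import Mathlib
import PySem

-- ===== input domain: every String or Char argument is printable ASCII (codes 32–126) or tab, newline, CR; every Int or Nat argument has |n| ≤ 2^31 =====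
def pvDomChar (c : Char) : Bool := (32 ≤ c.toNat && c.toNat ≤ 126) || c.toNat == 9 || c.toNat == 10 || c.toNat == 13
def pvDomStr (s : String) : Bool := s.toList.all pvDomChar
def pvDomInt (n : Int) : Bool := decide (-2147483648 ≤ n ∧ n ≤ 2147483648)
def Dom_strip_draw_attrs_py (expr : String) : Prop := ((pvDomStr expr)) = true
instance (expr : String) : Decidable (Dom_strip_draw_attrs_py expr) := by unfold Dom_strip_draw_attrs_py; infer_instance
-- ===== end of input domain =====

-- B replaces A's indexed character scan (depth counter) with a split-on-comma pass that rejoins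
-- segments and checks parenthesis balance of the growing prefix (objective: faster, measured).

-- ===== PORT A =====
-- the enumerate loop: cs is the not-yet-visited suffix, i the current index, d = paren_depth
def stripA_loop (e : String) (cs : List Char) (i : Nat) (d : Int) : String :=
  match cs with
  | [] => e
  | c :: rest =>
    if c = '(' then stripA_loop e rest (i + 1) (d + 1)
    else if c = ')' then stripA_loop e rest (i + 1) (d - 1)
    else if c = ',' ∧ d = 0 then
      -- expr[:i].strip()
      String.ofList (PySem.Chars.strip (PySem.List.slice e.toList none (some (i : Int))))
    else stripA_loop e rest (i + 1) d

def strip_draw_attrs_py (expr : String) : String :=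
  let e := PySem.Str.strip expr
  stripA_loop e e.toList 0 0

-- ===== PORT B =====
-- one iteration per segment of parts[:-1]; consumed = the segments appended so far
def stripB_loop (s : String) (parts : List (List Char)) (consumed : List (List Char)) : String :=
  match parts with
  | [] => s
  | p :: rest =>
    let consumed' := consumed ++ [p]
    let pre := PySem.Chars.join [','] consumed'        -- ','.join(consumed)
    -- prefix.count('(') == prefix.count(')') : str.count of a single character = occurrence count
    if pre.count '(' = pre.count ')' then String.ofList (PySem.Chars.strip pre)
    else stripB_loop s rest consumed'

def strip_draw_attrs_py_alt (expr : String) : String :=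
  let s := PySem.Str.strip expr
  -- s.split(',') : exact for a single-character separator ("".split(',') == [''] matches [].splitOn = [[]])
  let parts := s.toList.splitOn ','
  stripB_loop s parts.dropLast []                      -- parts[:-1] = all but the last segment

-- ===== PRECONDITION & SPEC =====
def Spec_strip_draw_attrs_py (expr : String) (out : String) : Prop := out = strip_draw_attrs_py_alt expr
instance (expr : String) (out : String) : Decidable (Spec_strip_draw_attrs_py expr out) := by unfold Spec_strip_draw_attrs_py; infer_instance

-- ===== CLAIM (what is proved, stated in full; the proofs are below) =====
def Claim_equal_strip_draw_attrs_py : Prop := ∀ (expr : String), Dom_strip_draw_attrs_py expr → Spec_strip_draw_attrs_py expr (strip_draw_attrs_py expr)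

-- ===== LEMMAS AND PROOFS =====

-- parenthesis balance of a character list
def pvBal (l : List Char) : Int := (l.count '(' : Int) - (l.count ')' : Int)

lemma pvBal_append (a b : List Char) : pvBal (a ++ b) = pvBal a + pvBal b := by
  simp [pvBal, List.count_append]; omega

-- crossing a comma-free segment only shifts the index and the depth
lemma stripA_loop_seg (e : String) (seg : List Char) (hseg : ',' ∉ seg) :
    ∀ (cs : List Char) (i : Nat) (d : Int),
      stripA_loop e (seg ++ cs) i d = stripA_loop e cs (i + seg.length) (d + pvBal seg) := by
  induction seg with
  | nil => intro cs i d; simp [pvBal]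
  | cons c t ih =>
    intro cs i d
    have hct : ',' ∉ t := fun h => hseg (List.mem_cons_of_mem _ h)
    have hcc : c ≠ ',' := fun h => hseg (h ▸ List.mem_cons_self)
    by_cases h1 : c = '('
    · subst h1
      rw [List.cons_append, stripA_loop, if_pos rfl, ih hct]
      have : pvBal ('(' :: t) = pvBal t + 1 := by
        simp [pvBal]; omega
      rw [this]; simp only [List.length_cons]; ring_nf
    · by_cases h2 : c = ')'
      · subst h2
        rw [List.cons_append, stripA_loop, if_neg (by decide), if_pos rfl, ih hct]
        have : pvBal (')' :: t) = pvBal t - 1 := by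
          simp [pvBal]; omega
        rw [this]; simp only [List.length_cons]; ring_nf
      · rw [List.cons_append, stripA_loop, if_neg h1, if_neg h2,
          if_neg (fun h => hcc h.1), ih hct]
        have : pvBal (c :: t) = pvBal t := by
          simp [pvBal, h1, h2]
        rw [this]; simp only [List.length_cons]; ring_nf

lemma stripA_loop_comma (e : String) (cs : List Char) (i : Nat) (d : Int) :
    stripA_loop e (',' :: cs) i d =
      if d = 0 then
        String.ofList (PySem.Chars.strip (PySem.List.slice e.toList none (some (i : Int))))
      else stripA_loop e cs (i + 1) d := by
  rw [stripA_loop, if_neg (by decide), if_neg (by decide)]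
  by_cases hd : d = 0
  · rw [if_pos ⟨rfl, hd⟩, if_pos hd]
  · rw [if_neg (fun h => hd h.2), if_neg hd]

-- join of consumed ++ [p], split into the already-consumed prefix (with its trailing comma) and p
lemma join_append_singleton (cons : List (List Char)) (p : List Char) :
    PySem.Chars.join [','] (cons ++ [p]) =
      (if cons = [] then [] else PySem.Chars.join [','] cons ++ [',']) ++ p := by
  induction cons with
  | nil => simp [PySem.Chars.join_singleton]
  | cons a t ih =>
    cases t with
    | nil => simp [PySem.Chars.join_cons_cons, PySem.Chars.join_singleton]
    | cons b u =>
      simp only [List.cons_append] at ih ⊢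
      rw [PySem.Chars.join_cons_cons, ih]
      simp [PySem.Chars.join_cons_cons]

-- every piece produced by splitOn is free of the separator
lemma splitOn_pieces_no_sep (x : Char) :
    ∀ (l : List Char), ∀ piece ∈ l.splitOn x, x ∉ piece := by
  intro l
  induction l with
  | nil => intro piece hp; simp [List.splitOn] at hp; simp [hp]
  | cons c t ih =>
    intro piece hp
    rw [List.splitOn, List.splitOnP_cons] at hp
    by_cases hc : c = x
    · rw [if_pos (by simp [hc])] at hp
      rcases List.mem_cons.1 hp with h | h
      · simp [h]
      · exact ih piece h
    · rw [if_neg (by simp [hc])] at hp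
      obtain ⟨h1, t1, ht⟩ := List.exists_cons_of_ne_nil (List.splitOnP_ne_nil (· == x) t)
      rw [ht] at hp
      simp only [List.modifyHead_cons] at hp
      rcases List.mem_cons.1 hp with h | h
      · subst h
        intro hmem
        rcases List.mem_cons.1 hmem with h' | h'
        · exact hc h'.symm
        · exact ih h1 (by rw [List.splitOn, ht]; exact List.mem_cons_self) h'
      · exact ih piece (by rw [List.splitOn, ht]; exact List.mem_cons_of_mem _ h)

-- the consumed prefix of the stripped string, as characters: segments rejoined, plus a trailing comma
def pvPref (cons : List (List Char)) : List Char :=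
  if cons = [] then [] else PySem.Chars.join [','] cons ++ [',']

-- main correspondence: A's scan over the remaining segments = B's segment loop
lemma key (e : String) (lastSeg : List Char) (hlast : ',' ∉ lastSeg) :
    ∀ (parts cons : List (List Char)),
      (∀ p ∈ parts, ',' ∉ p) →
      e.toList = pvPref cons ++ PySem.Chars.join [','] (parts ++ [lastSeg]) →
      stripA_loop e (PySem.Chars.join [','] (parts ++ [lastSeg])) (pvPref cons).length
          (pvBal (pvPref cons)) =
        stripB_loop e parts cons := by
  intro parts
  induction parts with
  | nil =>
    intro cons _ _
    rw [stripB_loop, List.nil_append, PySem.Chars.join_singleton]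
    have h := stripA_loop_seg e lastSeg hlast [] (pvPref cons).length (pvBal (pvPref cons))
    rw [List.append_nil] at h
    rw [h, stripA_loop]
  | cons p rest ih =>
    intro cons hnc he
    have hpnc : ',' ∉ p := hnc p List.mem_cons_self
    have hrest : ∀ q ∈ rest, ',' ∉ q := fun q hq => hnc q (List.mem_cons_of_mem _ hq)
    have hjoin : PySem.Chars.join [','] ((p :: rest) ++ [lastSeg]) =
        p ++ [','] ++ PySem.Chars.join [','] (rest ++ [lastSeg]) := by
      obtain ⟨y, ys, hys⟩ : ∃ y ys, rest ++ [lastSeg] = y :: ys := by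
        cases rest with
        | nil => exact ⟨lastSeg, [], rfl⟩
        | cons a b => exact ⟨a, b ++ [lastSeg], rfl⟩
      rw [List.cons_append, hys, PySem.Chars.join_cons_cons]
    rw [stripB_loop]
    have hpre : PySem.Chars.join [','] (cons ++ [p]) = pvPref cons ++ p := by
      rw [join_append_singleton]; rfl
    rw [hjoin, List.append_assoc, stripA_loop_seg e p hpnc, List.singleton_append, stripA_loop_comma]
    rw [hpre]
    have hcond : ((pvPref cons ++ p).count '(' = (pvPref cons ++ p).count ')') ↔
        (pvBal (pvPref cons) + pvBal p = 0) := by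
      unfold pvBal
      rw [List.count_append, List.count_append]
      omega
    by_cases hz : pvBal (pvPref cons) + pvBal p = 0
    · rw [if_pos hz, if_pos (hcond.2 hz)]
      have hsl : PySem.List.slice e.toList none (some (((pvPref cons).length + p.length : Nat) : Int)) =
          pvPref cons ++ p := by
        rw [PySem.List.slice_to _ (by positivity)]
        rw [hjoin] at he
        rw [he, Int.toNat_natCast]
        have hgrp : pvPref cons ++ (p ++ [','] ++ PySem.Chars.join [','] (rest ++ [lastSeg])) =
            (pvPref cons ++ p) ++ ([','] ++ PySem.Chars.join [','] (rest ++ [lastSeg])) := by simp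
        rw [hgrp, ← List.length_append]
        exact List.take_left
      rw [hsl]
    · rw [if_neg hz, if_neg (fun h => hz (hcond.1 h))]
      have hcons' : pvPref (cons ++ [p]) = pvPref cons ++ p ++ [','] := by
        rw [pvPref, if_neg (by simp), join_append_singleton]; rfl
      have hlen : (pvPref cons).length + p.length + 1 = (pvPref (cons ++ [p])).length := by
        rw [hcons']; simp only [List.length_append, List.length_cons, List.length_nil]
      have hbal : pvBal (pvPref cons) + pvBal p = pvBal (pvPref (cons ++ [p])) := by
        rw [hcons', pvBal_append, pvBal_append]
        have : pvBal [','] = 0 := by decide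
        rw [this]; ring
      rw [hlen, hbal]
      apply ih (cons ++ [p]) hrest
      rw [hjoin] at he
      rw [hcons', he]
      simp

-- ===== VERDICT (by name: the statement is the Claim_ definition above) =====
theorem strip_draw_attrs_py_spec : Claim_equal_strip_draw_attrs_py := by
  intro expr _
  unfold Spec_strip_draw_attrs_py strip_draw_attrs_py strip_draw_attrs_py_alt
  set e := PySem.Str.strip expr with he
  set segs := e.toList.splitOn ',' with hsegs
  have hne : segs ≠ [] := List.splitOnP_ne_nil _ _
  have hdecomp : segs.dropLast ++ [segs.getLast hne] = segs := List.dropLast_append_getLast hne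
  have hpieces : ∀ p ∈ segs, ',' ∉ p := splitOn_pieces_no_sep ',' e.toList
  have hjoin : PySem.Chars.join [','] segs = e.toList := by
    rw [hsegs]; exact List.intercalate_splitOn (xs := e.toList) ','
  have hmain := key e (segs.getLast hne) (hpieces _ (List.getLast_mem hne)) segs.dropLast []
    (fun p hp => hpieces p (List.dropLast_subset _ hp))
    (by rw [hdecomp, hjoin]; rfl)
  rw [hdecomp, hjoin] at hmain
  have hl0 : (pvPref ([] : List (List Char))).length = 0 := rfl
  have hb0 : pvBal (pvPref ([] : List (List Char))) = 0 := by decide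
  rw [hl0, hb0] at hmain
  exact hmain
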